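-- pv_equiv track=rewrite | github.com/yougnut/Notion-to-Obsidian-Converter | notion_to_obsidian_bulk.py | fix_table_formatting
-- ===== SOURCE A (Python) =====
-- SETTINGS = {
--     'move_assets': False,
--     'enable_yaml': True,
--     'fix_tables': True,
--     'delete_source_csv': True,
--     'auto_zip': True,
--     'open_folder': True
-- }
--
-- def fix_table_formatting(text):
--     if not SETTINGS['fix_tables']: return text
--     lines = text.split('\n')
--     new_lines = []
--     buffer = ""
--     in_code_block = False
--     in_math_block = False
--     for line in lines:
--         if line.strip().startswith('```'):
--             in_code_block = not in_code_block
--             if buffer: new_lines.append(buffer); buffer = ""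
--             new_lines.append(line); continue
--         if line.strip() == '$$':
--             in_math_block = not in_math_block
--             if buffer: new_lines.append(buffer); buffer = ""
--             new_lines.append(line); continue
--         if in_code_block or in_math_block: new_lines.append(line); continue
--         stripped = line.strip()
--         if buffer:
--             buffer += "<br>" + stripped
--             if stripped.endswith('|'): new_lines.append(buffer); buffer = ""
--             continue
--         if stripped.startswith('|'):
--             if stripped.endswith('|'): new_lines.append(line)
--             else: buffer = line
--         else: new_lines.append(line)
--     if buffer: new_lines.append(buffer)
--     return '\n'.join(new_lines)
-- ===== SOURCE B (Python) =====
-- def fix_table_formatting(text):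
--     lines = text.split('\n')
--     out = []
--     in_code = False
--     in_math = False
--     i = 0
--     n = len(lines)
--     while i < n:
--         line = lines[i]
--         s = line.strip()
--         if s.startswith('```'):
--             in_code = not in_code
--             out.append(line)
--             i += 1
--             continue
--         if s == '$$':
--             in_math = not in_math
--             out.append(line)
--             i += 1
--             continue
--         if in_code or in_math or not (s.startswith('|') and not s.endswith('|')):
--             out.append(line)
--             i += 1
--             continue
--         # a table row broken across lines: consume pieces until one ends with '|',
--         # stopping (without consuming) at a fence or end of input
--         buf = line
--         i += 1
--         while i < n:
--             nxt = lines[i].strip()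
--             if nxt.startswith('```') or nxt == '$$':
--                 break
--             buf += "<br>" + nxt
--             i += 1
--             if nxt.endswith('|'):
--                 break
--         out.append(buf)
--     return '\n'.join(out)
-- ===== Notes on version B (the rewrite author's own statement) =====
-- stated objective: alternative
-- what changed: Replaces A's persistent buffer state variable threaded through one flat for-loop by an index-based outer loop plus an explicit inner loop that consumes the continuation lines of a broken table row, stopping without consuming at a fence or end of input.
import Mathlib
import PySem

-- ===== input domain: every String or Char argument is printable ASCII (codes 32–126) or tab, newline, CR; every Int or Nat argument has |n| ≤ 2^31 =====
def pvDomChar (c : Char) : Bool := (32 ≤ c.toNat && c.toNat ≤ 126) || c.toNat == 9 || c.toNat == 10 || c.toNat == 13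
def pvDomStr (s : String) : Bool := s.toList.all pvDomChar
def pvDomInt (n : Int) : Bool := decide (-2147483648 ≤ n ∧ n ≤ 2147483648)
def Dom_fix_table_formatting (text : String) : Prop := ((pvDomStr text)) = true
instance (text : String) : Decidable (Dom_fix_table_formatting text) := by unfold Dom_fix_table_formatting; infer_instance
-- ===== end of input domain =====

-- B replaces A's persistent `buffer` state variable with an index-based outer loop and an
-- explicit inner loop that consumes the continuation lines of a broken table row (objective: alternative decomposition).
-- Both ports work on List Char lines (PySem.Chars, exact on the ASCII domain), with one toList/mk at the boundary.

-- ===== PORT A =====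
def pvSettings : PySem.Dict String Bool :=
  (((((PySem.Dict.empty.insert "move_assets" false).insert "enable_yaml" true).insert
      "fix_tables" true).insert "delete_source_csv" true).insert "auto_zip" true).insert
      "open_folder" true

-- the `for line in lines` loop of A, state = (new_lines, buffer, in_code_block, in_math_block)
def fixLoopA : List (List Char) → List (List Char) → List Char → Bool → Bool → List (List Char)
  | [], acc, buf, _, _ => if buf = [] then acc else acc ++ [buf]
  | l :: ls, acc, buf, code, math =>
    if PySem.Chars.startswith (PySem.Chars.strip l) "```".toList then
      fixLoopA ls ((if buf = [] then acc else acc ++ [buf]) ++ [l]) [] (!code) math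
    else if PySem.Chars.strip l = "$$".toList then
      fixLoopA ls ((if buf = [] then acc else acc ++ [buf]) ++ [l]) [] code (!math)
    else if code || math then fixLoopA ls (acc ++ [l]) buf code math
    else
      let s := PySem.Chars.strip l
      if buf = [] then
        if PySem.Chars.startswith s "|".toList then
          if PySem.Chars.endswith s "|".toList then fixLoopA ls (acc ++ [l]) [] code math
          else fixLoopA ls acc l code math
        else fixLoopA ls (acc ++ [l]) buf code math
      else
        let buf' := buf ++ "<br>".toList ++ s
        if PySem.Chars.endswith s "|".toList then fixLoopA ls (acc ++ [buf']) [] code math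
        else fixLoopA ls acc buf' code math

def fix_table_formatting (text : String) : String :=
  if PySem.Dict.getD pvSettings "fix_tables" false = false then text
  else
    String.ofList (PySem.Chars.join "\n".toList
      (fixLoopA (PySem.Chars.splitOn text.toList "\n".toList) [] [] false false))

-- ===== PORT B =====
-- inner `while` loop of Source B: consume continuation pieces of a broken table row,
-- stopping (without consuming) at a fence line or end of input
def consumeRow : List (List Char) → List Char → List Char × List (List Char)
  | [], buf => (buf, [])
  | l :: ls, buf =>
    let p := PySem.Chars.strip l
    if PySem.Chars.startswith p "```".toList || p = "$$".toList then (buf, l :: ls)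
    else
      let buf' := buf ++ "<br>".toList ++ p
      if PySem.Chars.endswith p "|".toList then (buf', ls)
      else consumeRow ls buf'

-- needed by fixLoopB's termination
theorem consumeRow_length : ∀ (ls : List (List Char)) (buf : List Char),
    (consumeRow ls buf).2.length ≤ ls.length := by
  intro ls
  induction ls with
  | nil => intro buf; simp [consumeRow]
  | cons l ls ih =>
    intro buf
    simp only [consumeRow]
    split
    · simp
    · split
      · simp
      · exact Nat.le_succ_of_le (ih _)

-- the outer `while i < n` loop of Source B
def fixLoopB : List (List Char) → Bool → Bool → List (List Char) → List (List Char)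
  | [], _, _, acc => acc
  | l :: ls, code, math, acc =>
    let s := PySem.Chars.strip l
    if PySem.Chars.startswith s "```".toList then fixLoopB ls (!code) math (acc ++ [l])
    else if s = "$$".toList then fixLoopB ls code (!math) (acc ++ [l])
    else if code || math || !(PySem.Chars.startswith s "|".toList && !PySem.Chars.endswith s "|".toList) then
      fixLoopB ls code math (acc ++ [l])
    else
      fixLoopB (consumeRow ls l).2 code math (acc ++ [(consumeRow ls l).1])
termination_by ls _ _ _ => ls.length
decreasing_by
  · simp
  · simp
  · simp
  · exact Nat.lt_succ_of_le (consumeRow_length ls l)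

def fix_table_formatting_alt (text : String) : String :=
  String.ofList (PySem.Chars.join "\n".toList
    (fixLoopB (PySem.Chars.splitOn text.toList "\n".toList) false false []))

-- ===== PRECONDITION & SPEC =====
def Spec_fix_table_formatting (text : String) (out : String) : Prop := out = fix_table_formatting_alt text
instance (text : String) (out : String) : Decidable (Spec_fix_table_formatting text out) := by unfold Spec_fix_table_formatting; infer_instance

-- ===== CLAIM (what is proved, stated in full; the proofs are below) =====
def Claim_equal_fix_table_formatting : Prop := ∀ (text : String), Dom_fix_table_formatting text → Spec_fix_table_formatting text (fix_table_formatting text)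

-- ===== LEMMAS AND PROOFS =====

theorem ne_nil_of_strip_startswith {l : List Char}
    (h : PySem.Chars.startswith (PySem.Chars.strip l) "|".toList = true) : l ≠ [] := by
  intro e; subst e; exact absurd h (by decide)

theorem fixLoop_key : ∀ (n : Nat) (ls : List (List Char)), ls.length ≤ n →
    (∀ acc code math, fixLoopA ls acc [] code math = fixLoopB ls code math acc) ∧
    (∀ acc buf, buf ≠ [] →
      fixLoopA ls acc buf false false =
        fixLoopB (consumeRow ls buf).2 false false (acc ++ [(consumeRow ls buf).1])) := by
  intro n
  induction n with
  | zero =>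
    intro ls hls
    have : ls = [] := List.eq_nil_of_length_eq_zero (Nat.le_zero.mp hls)
    subst this
    constructor
    · intro acc code math; simp [fixLoopA, fixLoopB]
    · intro acc buf hbuf; simp [fixLoopA, fixLoopB, consumeRow, hbuf]
  | succ n ih =>
    intro ls hls
    cases ls with
    | nil =>
      constructor
      · intro acc code math; simp [fixLoopA, fixLoopB]
      · intro acc buf hbuf; simp [fixLoopA, fixLoopB, consumeRow, hbuf]
    | cons l ls =>
      have hlen : ls.length ≤ n := Nat.succ_le_succ_iff.mp hls
      constructor
      · intro acc code math
        by_cases h1 : PySem.Chars.startswith (PySem.Chars.strip l) ['`','`','`'] = true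
        · simp [fixLoopA, fixLoopB, h1]
          exact (ih ls hlen).1 _ _ _
        · by_cases h2 : PySem.Chars.strip l = ['$','$']
          · simp [fixLoopA, fixLoopB, h2]
            exact (ih ls hlen).1 _ _ _
          · by_cases h3 : (code || math) = true
            · simp [fixLoopA, fixLoopB, h1, h2, h3]
              exact (ih ls hlen).1 _ _ _
            · have hc : code = false := by revert h3; cases code <;> simp
              have hm : math = false := by revert h3; cases math <;> simp
              subst hc; subst hm
              by_cases h4 : PySem.Chars.startswith (PySem.Chars.strip l) ['|'] = true
              · by_cases h5 : PySem.Chars.endswith (PySem.Chars.strip l) ['|'] = true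
                · simp [fixLoopA, fixLoopB, h1, h2, h4, h5]
                  exact (ih ls hlen).1 _ _ _
                · simp [fixLoopA, fixLoopB, h1, h2, h4, h5]
                  exact (ih ls hlen).2 _ _ (ne_nil_of_strip_startswith h4)
              · simp [fixLoopA, fixLoopB, h1, h2, h4]
                exact (ih ls hlen).1 _ _ _
      · intro acc buf hbuf
        by_cases h1 : PySem.Chars.startswith (PySem.Chars.strip l) ['`','`','`'] = true
        · simp [fixLoopA, fixLoopB, consumeRow, h1, hbuf]
          rw [(ih ls hlen).1]
        · by_cases h2 : PySem.Chars.strip l = ['$','$']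
          · simp [fixLoopA, fixLoopB, consumeRow, h2, hbuf,
              show PySem.Chars.startswith ['$','$'] ['`','`','`'] = false from by decide]
            rw [(ih ls hlen).1]
          · by_cases h5 : PySem.Chars.endswith (PySem.Chars.strip l) ['|'] = true
            · simp [fixLoopA, consumeRow, h1, h2, h5, hbuf]
              exact (ih ls hlen).1 _ _ _
            · simp [fixLoopA, consumeRow, h1, h2, h5, hbuf]
              exact (ih ls hlen).2 acc _ (by simp)

-- ===== VERDICT (by name: the statement is the Claim_ definition above) =====
theorem fix_table_formatting_spec : Claim_equal_fix_table_formatting := by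
  unfold Claim_equal_fix_table_formatting
  intro text _
  unfold Spec_fix_table_formatting fix_table_formatting fix_table_formatting_alt
  rw [if_neg (by decide)]
  exact congrArg _ (congrArg _
    ((fixLoop_key (PySem.Chars.splitOn text.toList "\n".toList).length _ le_rfl).1 [] false false))
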